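-- pv_equiv track=rewrite | github.com/doktorfilip1/MetaheuritcsForTetris | game/testCode.py | can_place_next_block
-- ===== SOURCE A (Python) =====
-- def is_valid_placement(field, block, row, col):
--     field_h, field_w = len(field), len(field[0])
--     block_h, block_w = len(block), len(block[0])
--
--     if row + block_h > field_h or col + block_w > field_w:
--         return False  # Block goes out of field bounds
--
--     for i in range(block_h):
--         for j in range(block_w):
--             if block[i][j] == 1 and field[row + i][col + j] == 1:
--                 return False  # Overlap with occupied space
--
--     return True
--
-- def can_fall_to_position(field, block, row, col):
--     block_h, block_w = len(block), len(block[0])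
--
--     # Check if the block can stay at the given row without floating
--     if row + block_h == len(field):
--         return True  # Block is at the bottom
--
--     for i in range(block_h):
--         for j in range(block_w):
--             if block[i][j] == 1 and field[row + i + 1][col + j] == 1:
--                 return True  # Block rests on another block
--
--     return False
--
-- def can_place_next_block(field, block):
--     field_h, field_w = len(field), len(field[0])
--     block_h, block_w = len(block), len(block[0])
--
--     for col in range(field_w - block_w + 1):
--         for row in range(field_h - block_h, -1, -1):  # Start from the bottom
--             if is_valid_placement(field, block, row, col) and can_fall_to_position(field, block, row, col):
--                 return True  # Found at least one valid position
--
--     return False  # No valid position found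
-- ===== SOURCE B (Python) =====
-- def _col_mask(grid, c, h):
--     # bitmask of column c: bit r is set iff grid[r][c] == 1
--     m = 0
--     for r in reversed(range(h)):
--         m = 2 * m + (1 if grid[r][c] == 1 else 0)
--     return m
--
-- def can_place_next_block(field, block):
--     H, W = len(field), len(field[0])
--     bh, bw = len(block), len(block[0])
--     if bw > W or bh > H:
--         return False  # block cannot fit anywhere
--     fcol = [_col_mask(field, c, H) for c in range(W)]
--     bcol = [_col_mask(block, j, bh) for j in range(bw)]
--     for col in range(W - bw + 1):
--         for row in range(H - bh + 1):
--             if all((bcol[j] << row) & fcol[col + j] == 0 for j in range(bw)):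
--                 if row + bh == H or any((bcol[j] << (row + 1)) & fcol[col + j] != 0 for j in range(bw)):
--                     return True
--     return False
-- ===== Notes on version B (the rewrite author's own statement) =====
-- stated objective: alternative
-- what changed: B precomputes one big-integer bitmask per field column and per block column, so each candidate position is tested with bw shift-and-AND operations on whole columns instead of a bh*bw double loop over cells (plus a trivial early False when the block cannot fit).
-- outside the precondition, e.g. on can_place_next_block([[0, 0], [0]], [[1], [1]]): A returns True, B raises IndexError; on can_place_next_block([[1, 1], [1, 1]], [[0, 1], [0]]): A returns False, B raises IndexError
import Mathlib
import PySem

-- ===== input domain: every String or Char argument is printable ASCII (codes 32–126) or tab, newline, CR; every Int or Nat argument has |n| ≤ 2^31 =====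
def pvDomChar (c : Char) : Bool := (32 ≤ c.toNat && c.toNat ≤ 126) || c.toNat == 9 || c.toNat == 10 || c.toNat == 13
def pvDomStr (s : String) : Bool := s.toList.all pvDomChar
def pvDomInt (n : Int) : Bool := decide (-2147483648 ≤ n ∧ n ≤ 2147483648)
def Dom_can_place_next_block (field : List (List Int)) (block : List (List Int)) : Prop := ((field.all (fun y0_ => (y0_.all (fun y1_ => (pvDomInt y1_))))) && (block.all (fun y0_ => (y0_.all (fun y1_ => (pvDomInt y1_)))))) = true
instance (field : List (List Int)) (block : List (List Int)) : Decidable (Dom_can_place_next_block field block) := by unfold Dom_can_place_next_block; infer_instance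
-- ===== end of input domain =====

-- B re-implements the search with per-column bitmasks (one big-int mask per field/block
-- column; overlap and support become shift-and-AND tests), B's value is exact (same Bool);
-- objective: alternative algorithm, not measured faster.

-- ===== PORT A =====

-- grid[r][c] for indices known to be nonnegative and in range (guaranteed by the loop
-- bounds together with Pre_); exact there (Python would raise only out of range).
def pvGet2 (xs : List (List Int)) (r c : Int) : Int :=
  (PySem.List.pyGet? ((PySem.List.pyGet? xs r).getD []) c).getD 0

def is_valid_placement (field block : List (List Int)) (row col : Int) : Bool :=
  let fieldH : Int := field.length
  let fieldW : Int := (field.headD []).length   -- len(field[0]); field ≠ [] under Pre_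
  let blockH : Int := block.length
  let blockW : Int := (block.headD []).length
  if row + blockH > fieldH || col + blockW > fieldW then false
  else !((PySem.List.pyRange 0 blockH 1).any (fun i =>
      (PySem.List.pyRange 0 blockW 1).any (fun j =>
        pvGet2 block i j == 1 && pvGet2 field (row + i) (col + j) == 1)))

def can_fall_to_position (field block : List (List Int)) (row col : Int) : Bool :=
  let blockH : Int := block.length
  let blockW : Int := (block.headD []).length
  if row + blockH == (field.length : Int) then true
  else (PySem.List.pyRange 0 blockH 1).any (fun i =>
      (PySem.List.pyRange 0 blockW 1).any (fun j =>
        pvGet2 block i j == 1 && pvGet2 field (row + i + 1) (col + j) == 1))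

def can_place_next_block (field : List (List Int)) (block : List (List Int)) : Bool :=
  let fieldH : Int := field.length
  let fieldW : Int := (field.headD []).length
  let blockH : Int := block.length
  let blockW : Int := (block.headD []).length
  (PySem.List.pyRange 0 (fieldW - blockW + 1) 1).any (fun col =>
    (PySem.List.pyRange (fieldH - blockH) (-1) (-1)).any (fun row =>
      is_valid_placement field block row col && can_fall_to_position field block row col))

-- ===== PORT B =====

-- grid[r][c]; indices are Nat in B, in range under Pre_ and B's loop bounds
def pvCell (grid : List (List Int)) (r c : Nat) : Int := (grid.getD r []).getD c 0

-- _col_mask: m = 0; for r in reversed(range(h)): m = 2*m + (1 if grid[r][c]==1 else 0)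
def pvColMask (grid : List (List Int)) (c h : Nat) : Nat :=
  ((List.range h).reverse).foldl
    (fun m r => 2 * m + (if pvCell grid r c == 1 then 1 else 0)) 0

-- Python's range(n) over nonnegative counts is List.range with truncated Nat subtraction:
-- range(W - bw + 1) is empty exactly when W + 1 - bw = 0 in Nat, so the encoding is exact.
def can_place_next_block_alt (field : List (List Int)) (block : List (List Int)) : Bool :=
  let H := field.length
  let W := (field.headD []).length   -- len(field[0]); field ≠ [] under Pre_
  let bh := block.length
  let bw := (block.headD []).length
  if W < bw || H < bh then false   -- block cannot fit anywhere
  else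
  let fcol := (List.range W).map (fun c => pvColMask field c H)
  let bcol := (List.range bw).map (fun j => pvColMask block j bh)
  (List.range (W + 1 - bw)).any (fun col =>
    (List.range (H + 1 - bh)).any (fun row =>
      ((List.range bw).all (fun j =>
          ((bcol.getD j 0) <<< row) &&& (fcol.getD (col + j) 0) == 0)) &&
      (row + bh == H ||
        (List.range bw).any (fun j =>
          ((bcol.getD j 0) <<< (row + 1)) &&& (fcol.getD (col + j) 0) != 0))))

-- ===== PRECONDITION & SPEC =====
-- Pre_ excludes empty field/block (A raises IndexError at field[0]/block[0]) and, when the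
-- block fits (bw ≤ W and bh ≤ H), jagged inputs whose rows are shorter than their first row:
-- on those A raises on almost all inputs, and where A's lazy bottom-up scan happens to return
-- before touching a short row, B's whole-column mask precomputation still reads it and raises.
def Pre_can_place_next_block (field : List (List Int)) (block : List (List Int)) : Prop :=
  field ≠ [] ∧ block ≠ [] ∧
  ((field.headD []).length < (block.headD []).length ∨ field.length < block.length ∨
    ((∀ r ∈ field, (field.headD []).length ≤ r.length) ∧
     (∀ r ∈ block, (block.headD []).length ≤ r.length)))
instance (field : List (List Int)) (block : List (List Int)) : Decidable (Pre_can_place_next_block field block) := by unfold Pre_can_place_next_block; infer_instance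

def pvWitness_can_place_next_block : List (List Int) × List (List Int) := ([[0]], [[1]])

def Spec_can_place_next_block (field : List (List Int)) (block : List (List Int)) (out : Bool) : Prop := out = can_place_next_block_alt field block
instance (field : List (List Int)) (block : List (List Int)) (out : Bool) : Decidable (Spec_can_place_next_block field block out) := by unfold Spec_can_place_next_block; infer_instance

-- ===== CLAIM (what is proved, stated in full; the proofs are below) =====
def Claim_equal_can_place_next_block : Prop := ∀ (field : List (List Int)) (block : List (List Int)), Dom_can_place_next_block field block → Pre_can_place_next_block field block → Spec_can_place_next_block field block (can_place_next_block field block)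

-- ===== LEMMAS AND PROOFS =====

-- bits of the foldr-built mask are the list entries
theorem pv_ofBits_testBit (bs : List Bool) (i : Nat) :
    (bs.foldr (fun b m => 2 * m + (if b = true then 1 else 0)) 0).testBit i = bs.getD i false := by
  induction bs generalizing i with
  | nil => simp
  | cons b bs ih =>
    set M := bs.foldr (fun b m => 2 * m + (if b = true then 1 else 0)) 0 with hM
    cases i with
    | zero =>
      simp only [List.foldr_cons, ← hM, List.getD_cons_zero]
      rw [Nat.testBit_zero]
      cases b <;> simp
    | succ i =>
      simp only [List.foldr_cons, ← hM, List.getD_cons_succ]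
      rw [Nat.testBit_add_one]
      have h2 : (2 * M + (if b = true then 1 else 0)) / 2 = M := by split <;> omega
      rw [h2, ih]

theorem pvColMask_eq_foldr (g : List (List Int)) (c h : Nat) :
    pvColMask g c h =
      ((List.range h).map (fun r => pvCell g r c == 1)).foldr
        (fun b m => 2 * m + (if b = true then 1 else 0)) 0 := by
  simp [pvColMask, List.foldl_reverse, List.foldr_map]

theorem pv_colMask_testBit (g : List (List Int)) (c h i : Nat) :
    (pvColMask g c h).testBit i = (decide (i < h) && (pvCell g i c == 1)) := by
  rw [pvColMask_eq_foldr, pv_ofBits_testBit]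
  by_cases hi : i < h
  · simp [List.getD, hi]
  · simp [List.getD, hi]

theorem pv_and_eq_zero (x y : Nat) :
    x &&& y = 0 ↔ ∀ i, ¬(x.testBit i = true ∧ y.testBit i = true) := by
  constructor
  · intro h i ⟨h1, h2⟩
    have := Nat.testBit_and x y i
    rw [h] at this
    simp [h1, h2] at this
  · intro h
    apply Nat.eq_of_testBit_eq
    intro i
    have := h i
    simp only [Nat.testBit_and, Nat.zero_testBit]
    rcases Bool.eq_false_or_eq_true (x.testBit i) with hx | hx <;>
      rcases Bool.eq_false_or_eq_true (y.testBit i) with hy | hy <;>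
        simp_all

theorem pv_mask_zero_iff (gb gf : List (List Int)) (jb cf hb hf s : Nat) :
    ((pvColMask gb jb hb) <<< s) &&& pvColMask gf cf hf = 0 ↔
      ∀ i, ¬(i < hb ∧ pvCell gb i jb = 1 ∧ s + i < hf ∧ pvCell gf (s + i) cf = 1) := by
  rw [pv_and_eq_zero]
  constructor
  · intro h i ⟨h1, h2, h3, h4⟩
    apply h (s + i)
    refine ⟨?_, ?_⟩
    · rw [Nat.testBit_shiftLeft]
      have hss : s + i - s = i := by omega
      simp [hss, pv_colMask_testBit, h1, h2]
    · simp [pv_colMask_testBit, h3, h4]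
  · intro h t ⟨h1, h2⟩
    rw [Nat.testBit_shiftLeft] at h1
    have hst : s ≤ t := by
      by_contra hn
      simp [hn] at h1
    rw [pv_colMask_testBit] at h1 h2
    simp only [Bool.and_eq_true, decide_eq_true_eq, beq_iff_eq] at h1 h2
    exact h (t - s) ⟨h1.2.1, h1.2.2, by omega, by
      have : s + (t - s) = t := by omega
      rw [this]; exact h2.2⟩

theorem pvGet2_natCast (g : List (List Int)) (r c : Nat) :
    pvGet2 g (r : Int) (c : Int) = pvCell g r c := by
  simp [pvGet2, pvCell, PySem.List.pyGet?_natCast, List.getD]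

-- the common geometric condition both programs decide: the block fits at (col c, row r),
-- does not overlap, and is supported (bottom of the field or a filled cell below a block cell)
def pvGood (field block : List (List Int)) (c r : Nat) : Prop :=
  c + (block.headD []).length ≤ (field.headD []).length ∧
  r + block.length ≤ field.length ∧
  (∀ i j : Nat, i < block.length → j < (block.headD []).length →
      ¬(pvCell block i j = 1 ∧ pvCell field (r + i) (c + j) = 1)) ∧
  (r + block.length = field.length ∨
    ∃ i j : Nat, i < block.length ∧ j < (block.headD []).length ∧
      pvCell block i j = 1 ∧ pvCell field (r + 1 + i) (c + j) = 1)

theorem pv_alt_iff (field block : List (List Int)) :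
    can_place_next_block_alt field block = true ↔ ∃ c r : Nat, pvGood field block c r := by
  unfold can_place_next_block_alt
  by_cases hg : (field.head?.getD []).length < (block.head?.getD []).length ∨
      field.length < block.length
  · rw [if_pos (by simp; omega)]
    simp only [false_iff, Bool.false_eq_true, iff_false]  -- false = true ↔ ...
    rintro ⟨c, r, hcw, hrh, -⟩
    simp only [List.headD_eq_head?_getD] at hcw
    omega
  · rw [if_neg (by simp; omega)]
    simp only [List.any_eq_true, List.all_eq_true, List.mem_range, Bool.and_eq_true,
      Bool.or_eq_true, beq_iff_eq, bne_iff_ne]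
    constructor
    · rintro ⟨c, hc, r, hr, hv, hs⟩
      have hcw : c + (block.headD []).length ≤ (field.headD []).length := by omega
      have hrh : r + block.length ≤ field.length := by omega
      refine ⟨c, r, hcw, hrh, ?_, ?_⟩
      · intro i j hi hj ⟨hb1, hf1⟩
        have := hv j hj
        rw [PySem.List.getD_map_range _ _ _ _ hj,
            PySem.List.getD_map_range _ _ _ _ (by omega : c + j < (field.headD []).length),
            pv_mask_zero_iff] at this
        exact this i ⟨hi, hb1, by omega, hf1⟩
      · rcases hs with hs | ⟨j, hj, hs⟩
        · exact Or.inl hs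
        · rw [PySem.List.getD_map_range _ _ _ _ hj,
              PySem.List.getD_map_range _ _ _ _ (by omega : c + j < (field.headD []).length)] at hs
          rw [Ne, pv_mask_zero_iff] at hs
          push_neg at hs
          obtain ⟨i, hi, hb1, _, hf1⟩ := hs
          exact Or.inr ⟨i, j, hi, hj, hb1, hf1⟩
    · rintro ⟨c, r, hcw, hrh, hv, hs⟩
      refine ⟨c, by omega, r, by omega, ?_, ?_⟩
      · intro j hj
        rw [PySem.List.getD_map_range _ _ _ _ hj,
            PySem.List.getD_map_range _ _ _ _ (by omega : c + j < (field.headD []).length),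
            pv_mask_zero_iff]
        intro i ⟨hi, hb1, _, hf1⟩
        exact hv i j hi hj ⟨hb1, hf1⟩
      · by_cases hH : r + block.length = field.length
        · exact Or.inl hH
        rcases hs with hs | ⟨i, j, hi, hj, hb1, hf1⟩
        · exact Or.inl hs
        · refine Or.inr ⟨j, hj, ?_⟩
          rw [PySem.List.getD_map_range _ _ _ _ hj,
              PySem.List.getD_map_range _ _ _ _ (by omega : c + j < (field.headD []).length),
              Ne, pv_mask_zero_iff]
          push_neg
          exact ⟨i, hi, hb1, by omega, hf1⟩

theorem pv_valid_iff (field block : List (List Int)) (r c : Nat)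
    (hr : r + block.length ≤ field.length)
    (hc : c + (block.headD []).length ≤ (field.headD []).length) :
    is_valid_placement field block (r : Int) (c : Int) = true ↔
      ∀ i j : Nat, i < block.length → j < (block.headD []).length →
        ¬(pvCell block i j = 1 ∧ pvCell field (r + i) (c + j) = 1) := by
  have hc' : c + (block.head?.getD []).length ≤ (field.head?.getD []).length := by
    simpa [List.headD_eq_head?_getD] using hc
  unfold is_valid_placement
  rw [if_neg (by simp; omega)]
  simp only [Bool.not_eq_true', List.any_eq_false, PySem.List.mem_pyRange_one]
  constructor
  · intro h i j hi hj ⟨hb1, hf1⟩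
    have hmem : (i : Int) ∈ PySem.List.pyRange 0 (block.length : Int) 1 := by
      rw [PySem.List.mem_pyRange_one]; omega
    have := h (i : Int) ⟨by omega, by omega⟩
    rw [Bool.not_eq_true, List.any_eq_false] at this
    have h2 := this (j : Int) (by rw [PySem.List.mem_pyRange_one]; omega)
    rw [pvGet2_natCast,
        show ((r : Int) + (i : Int)) = ((r + i : Nat) : Int) by push_cast; ring,
        show ((c : Int) + (j : Int)) = ((c + j : Nat) : Int) by push_cast; ring,
        pvGet2_natCast] at h2
    simp [hb1, hf1] at h2
  · intro h x ⟨hx0, hx1⟩ hbad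
    rw [List.any_eq_true] at hbad
    obtain ⟨y, hy, hyv⟩ := hbad
    rw [PySem.List.mem_pyRange_one] at hy
    rw [show x = ((x.toNat : Nat) : Int) by omega,
        show y = ((y.toNat : Nat) : Int) by omega, pvGet2_natCast,
        show ((r : Int) + ((x.toNat : Nat) : Int)) = ((r + x.toNat : Nat) : Int) by push_cast; ring,
        show ((c : Int) + ((y.toNat : Nat) : Int)) = ((c + y.toNat : Nat) : Int) by push_cast; ring,
        pvGet2_natCast] at hyv
    simp only [Bool.and_eq_true, beq_iff_eq] at hyv
    exact h x.toNat y.toNat (by omega) (by omega) hyv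

theorem pv_fall_iff (field block : List (List Int)) (r c : Nat) :
    can_fall_to_position field block (r : Int) (c : Int) = true ↔
      (r + block.length = field.length ∨
        ∃ i j : Nat, i < block.length ∧ j < (block.headD []).length ∧
          pvCell block i j = 1 ∧ pvCell field (r + 1 + i) (c + j) = 1) := by
  unfold can_fall_to_position
  by_cases hH : r + block.length = field.length
  · rw [if_pos (by simp; omega)]
    simp [hH]
  · rw [if_neg (by simp; omega)]
    rw [List.any_eq_true]
    constructor
    · rintro ⟨x, hx, hxv⟩
      rw [PySem.List.mem_pyRange_one] at hx
      rw [List.any_eq_true] at hxv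
      obtain ⟨y, hy, hyv⟩ := hxv
      rw [PySem.List.mem_pyRange_one] at hy
      rw [show x = ((x.toNat : Nat) : Int) by omega,
          show y = ((y.toNat : Nat) : Int) by omega, pvGet2_natCast,
          show ((r : Int) + ((x.toNat : Nat) : Int) + 1) = ((r + 1 + x.toNat : Nat) : Int) by push_cast; ring,
          show ((c : Int) + ((y.toNat : Nat) : Int)) = ((c + y.toNat : Nat) : Int) by push_cast; ring,
          pvGet2_natCast] at hyv
      simp only [Bool.and_eq_true, beq_iff_eq] at hyv
      exact Or.inr ⟨x.toNat, y.toNat, by omega, by omega, hyv⟩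
    · rintro (hs | ⟨i, j, hi, hj, hb1, hf1⟩)
      · omega
      · refine ⟨(i : Int), by rw [PySem.List.mem_pyRange_one]; omega, ?_⟩
        rw [List.any_eq_true]
        refine ⟨(j : Int), by rw [PySem.List.mem_pyRange_one]; omega, ?_⟩
        rw [pvGet2_natCast,
            show ((r : Int) + (i : Int) + 1) = ((r + 1 + i : Nat) : Int) by push_cast; ring,
            show ((c : Int) + (j : Int)) = ((c + j : Nat) : Int) by push_cast; ring,
            pvGet2_natCast]
        simp [hb1, hf1]

theorem pv_a_iff (field block : List (List Int)) :
    can_place_next_block field block = true ↔ ∃ c r : Nat, pvGood field block c r := by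
  unfold can_place_next_block
  simp only [List.any_eq_true, PySem.List.mem_pyRange_one, PySem.List.mem_pyRange_neg_one,
    Bool.and_eq_true]
  constructor
  · rintro ⟨col, ⟨hc0, hc1⟩, row, ⟨hr0, hr1⟩, hv, hfall⟩
    have hrb : row.toNat + block.length ≤ field.length := by omega
    have hcb : col.toNat + (block.headD []).length ≤ (field.headD []).length := by omega
    rw [show col = ((col.toNat : Nat) : Int) by omega,
        show row = ((row.toNat : Nat) : Int) by omega] at hv hfall
    exact ⟨col.toNat, row.toNat, hcb, hrb,
      (pv_valid_iff field block _ _ hrb hcb).mp hv,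
      (pv_fall_iff field block _ _).mp hfall⟩
  · rintro ⟨c, r, hcb, hrb, hv, hs⟩
    exact ⟨(c : Int), ⟨by omega, by omega⟩, (r : Int), ⟨by omega, by omega⟩,
      (pv_valid_iff field block r c hrb hcb).mpr hv,
      (pv_fall_iff field block r c).mpr hs⟩

-- ===== VERDICT (by name: the statement is the Claim_ definition above) =====
theorem can_place_next_block_spec : Claim_equal_can_place_next_block := by
  intro field block _ _
  unfold Spec_can_place_next_block
  rw [Bool.eq_iff_iff]
  exact (pv_a_iff field block).trans (pv_alt_iff field block).symm
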